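-- pv_equiv track=rewrite | github.com/pypi-data/pypi-mirror-357 | packages/storybuilder/storybuilder-0.1.7-py3-none-any.whl/storybuilder/utils/helpers.py | get_actors
-- ===== SOURCE A (Python) =====
-- VISIBLE_ACTORS=("boy", "girl", "cue", "eily", "eilly")
--
-- INVISIBLE_ACTORS=("", "M", "F")
--
-- def get_actors(objects):
--     assert isinstance(objects, list)
--     actor = None
--     narrator = None
--     defaultObject = None
--     for i, object in enumerate(objects):
--         if object.get("name", None) in VISIBLE_ACTORS:
--             actor = object["name"]
--         elif object.get("name", None) in INVISIBLE_ACTORS: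
--             narrator = object["name"]
--         else:
--             defaultObject = object.get("name", None)
--     return actor, narrator, defaultObject
-- ===== SOURCE B (Python) =====
-- VISIBLE_ACTORS=("boy", "girl", "cue", "eily", "eilly")
--
-- INVISIBLE_ACTORS=("", "M", "F")
--
-- def get_actors(objects):
--     assert isinstance(objects, list)
--     vis = [o["name"] for o in objects if o.get("name", None) in VISIBLE_ACTORS]
--     inv = [o["name"] for o in objects
--            if o.get("name", None) not in VISIBLE_ACTORS
--            and o.get("name", None) in INVISIBLE_ACTORS]
--     dflt = [o.get("name", None) for o in objects
--             if o.get("name", None) not in VISIBLE_ACTORS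
--             and o.get("name", None) not in INVISIBLE_ACTORS]
--     return (vis[-1] if vis else None,
--             inv[-1] if inv else None,
--             dflt[-1] if dflt else None)
-- ===== Notes on version B (the rewrite author's own statement) =====
-- stated objective: simpler
-- what changed: Replaced the single stateful loop with three independent filtering passes (visible / invisible / default names) followed by taking each list's last element, tracking presence via list emptiness.
import Mathlib
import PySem

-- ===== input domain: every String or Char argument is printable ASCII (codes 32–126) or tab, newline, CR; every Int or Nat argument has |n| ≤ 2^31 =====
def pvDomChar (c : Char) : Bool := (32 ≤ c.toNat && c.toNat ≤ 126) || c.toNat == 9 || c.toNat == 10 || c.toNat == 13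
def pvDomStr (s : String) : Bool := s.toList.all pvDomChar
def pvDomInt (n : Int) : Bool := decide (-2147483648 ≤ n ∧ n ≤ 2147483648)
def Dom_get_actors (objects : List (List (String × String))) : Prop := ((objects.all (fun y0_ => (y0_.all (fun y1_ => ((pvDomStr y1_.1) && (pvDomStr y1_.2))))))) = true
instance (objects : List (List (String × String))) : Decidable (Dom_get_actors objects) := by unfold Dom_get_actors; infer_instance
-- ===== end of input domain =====

-- B rewrites A's single stateful loop as three independent filtering passes plus last-element selection (objective: simpler decomposition; same O(n) cost).
-- ===== PORT A =====
def visibleActors : List String := ["boy", "girl", "cue", "eily", "eilly"]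

def invisibleActors : List String := ["", "M", "F"]

-- object.get("name", None): first match in the association list (exact for Python dict lookup)
def getName (o : List (String × String)) : Option String :=
  (o.find? (fun p => p.1 == "name")).map (·.2)

-- membership test 'x in tuple' lifted to the Option returned by .get (None is in neither tuple)
def optMem (n : Option String) (l : List String) : Bool :=
  match n with
  | some v => l.contains v
  | none => false

def get_actors (objects : List (List (String × String))) : Option String × Option String × Option String :=
  objects.foldl
    (fun (s : Option String × Option String × Option String) obj =>
      if optMem (getName obj) visibleActors then (getName obj, s.2.1, s.2.2)
      else if optMem (getName obj) invisibleActors then (s.1, getName obj, s.2.2)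
      else (s.1, s.2.1, getName obj))
    (none, none, none)

-- ===== PORT B =====
def get_actors_alt (objects : List (List (String × String))) : Option String × Option String × Option String :=
  let vis := objects.filterMap (fun o =>
    if optMem (getName o) visibleActors then getName o else none)
  let inv := objects.filterMap (fun o =>
    if !optMem (getName o) visibleActors && optMem (getName o) invisibleActors then getName o else none)
  let dflt := (objects.filter (fun o =>
    !optMem (getName o) visibleActors && !optMem (getName o) invisibleActors)).map getName
  (vis.getLast?, inv.getLast?, (dflt.getLast?).getD none)

-- ===== PRECONDITION & SPEC =====
def Spec_get_actors (objects : List (List (String × String))) (out : Option String × Option String × Option String) : Prop := out = get_actors_alt objects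
instance (objects : List (List (String × String))) (out : Option String × Option String × Option String) : Decidable (Spec_get_actors objects out) := by unfold Spec_get_actors; infer_instance

-- ===== CLAIM (what is proved, stated in full; the proofs are below) =====
def Claim_equal_get_actors : Prop := ∀ (objects : List (List (String × String))), Dom_get_actors objects → Spec_get_actors objects (get_actors objects)

-- ===== LEMMAS AND PROOFS =====

-- ===== VERDICT (by name: the statement is the Claim_ definition above) =====
-- last element of v :: l, with fallback a, equals last of l with fallback (some v)
theorem lastOr {α : Type} (v : α) (l : List α) (a : Option α) :
    (v :: l).getLast?.or a = l.getLast?.or (some v) := by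
  cases l with
  | nil => simp
  | cons x xs => simp [List.getLast?_cons]

-- getD version of the same fact
theorem lastGetD {α : Type} (v : α) (l : List α) (d : α) :
    ((v :: l).getLast?).getD d = (l.getLast?).getD v := by
  cases l with
  | nil => simp
  | cons x xs => simp [List.getLast?_cons]

-- loop invariant: the fold from an arbitrary start state is the three last-elements with the start state as fallback
theorem get_actors_fold_eq (objects : List (List (String × String)))
    (a nr d : Option String) :
    objects.foldl
      (fun (s : Option String × Option String × Option String) obj =>
        if optMem (getName obj) visibleActors then (getName obj, s.2.1, s.2.2)
        else if optMem (getName obj) invisibleActors then (s.1, getName obj, s.2.2)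
        else (s.1, s.2.1, getName obj))
      (a, nr, d)
    = ((objects.filterMap (fun o =>
          if optMem (getName o) visibleActors then getName o else none)).getLast?.or a,
       (objects.filterMap (fun o =>
          if !optMem (getName o) visibleActors && optMem (getName o) invisibleActors then getName o else none)).getLast?.or nr,
       (((objects.filter (fun o =>
          !optMem (getName o) visibleActors && !optMem (getName o) invisibleActors)).map getName).getLast?).getD d) := by
  induction objects generalizing a nr d with
  | nil => simp
  | cons o rest ih =>
    simp only [List.foldl_cons, List.filterMap_cons, List.filter_cons]
    by_cases hv : optMem (getName o) visibleActors
    · obtain ⟨v, hn⟩ : ∃ v, getName o = some v := by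
        cases h : getName o with
        | none => rw [h] at hv; simp [optMem] at hv
        | some v => exact ⟨v, rfl⟩
      rw [hn] at hv ⊢
      simp only [hv, Bool.not_true, Bool.false_and, Bool.false_eq_true, if_false, ite_true]
      rw [ih, lastOr]
    · by_cases hi : optMem (getName o) invisibleActors
      · obtain ⟨v, hn⟩ : ∃ v, getName o = some v := by
          cases h : getName o with
          | none => rw [h] at hi; simp [optMem] at hi
          | some v => exact ⟨v, rfl⟩
        rw [hn] at hv hi ⊢
        rw [Bool.not_eq_true] at hv
        simp only [hv, hi, Bool.not_false, Bool.not_true, Bool.true_and, Bool.false_eq_true,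
          if_false, ite_true]
        rw [ih, lastOr]
      · rw [Bool.not_eq_true] at hv hi
        simp only [hv, hi, Bool.not_false, Bool.true_and, Bool.and_self, Bool.false_eq_true,
          if_false, ite_true, List.map_cons]
        rw [ih, lastGetD]

theorem get_actors_spec : Claim_equal_get_actors := by
  intro objects _
  unfold Spec_get_actors get_actors get_actors_alt
  rw [get_actors_fold_eq]
  simp
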